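-- pv_equiv track=rewrite | github.com/vbronetskyi/OP_python | cms1/LB_5/#4/acronym.py | create_acronym
-- ===== SOURCE A (Python) =====
-- def create_acronym(message):
--     """
--     (str) -> str
--     Returns acronyms for phrases
--     >>> create_acronym("random access memory\\nAs soon As possible")
--     'RAM - random access memory\\nASAP - As soon As possible'
--     """
--
--     message = message.split('\n')
--     save_mes = message[:]
--     for i in range(len(message)):
--         message[i] = message[i].split(' ')
--     acronym = ''
--     for i in range(len(message)):
--         for j in range(len(message[i])):
--             acronym += str(message[i][j][0])
--         acronym += ' '
--     acronym = acronym.upper()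
--     acronym = acronym.split(' ')
--     solut = ''
--     for i in range(len(message)):
--         solut += str(acronym[i])
--         solut += ' - '
--         solut += str(save_mes[i])
--         if i != len(message) - 1:
--             solut += '\n'
--
--     return solut
-- ===== SOURCE B (Python) =====
-- def create_acronym(message):
--     """
--     (str) -> str
--     Returns acronyms for phrases
--     >>> create_acronym("random access memory\nAs soon As possible")
--     'RAM - random access memory\nASAP - As soon As possible'
--     """
--     result = []
--     for line in message.split('\n'):
--         acronym = ''.join(word[0] for word in line.split(' ')).upper()
--         result.append(acronym + ' - ' + line)
--     return '\n'.join(result)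
-- ===== Notes on version B (the rewrite author's own statement) =====
-- stated objective: simpler
-- what changed: B computes and formats each line's acronym in one pass over the split lines and joins the formatted lines with a newline, instead of A's three separate index loops that build one global space-separated acronym string, re-split it and re-index it.
import Mathlib
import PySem

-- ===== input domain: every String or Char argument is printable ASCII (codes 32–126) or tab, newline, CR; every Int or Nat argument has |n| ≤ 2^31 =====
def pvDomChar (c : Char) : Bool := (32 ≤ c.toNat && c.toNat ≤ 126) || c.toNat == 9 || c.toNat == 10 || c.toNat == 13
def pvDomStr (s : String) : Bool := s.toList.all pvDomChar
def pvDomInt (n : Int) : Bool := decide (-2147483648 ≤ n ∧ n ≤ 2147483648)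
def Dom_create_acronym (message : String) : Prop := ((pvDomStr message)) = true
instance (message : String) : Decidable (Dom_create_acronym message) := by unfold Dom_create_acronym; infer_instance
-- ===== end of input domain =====

-- B computes and formats each line's acronym in one pass over the split lines, instead of
-- A's three index loops building one global space-separated acronym string and re-splitting it;
-- objective: simpler.


-- ===== PORT A =====
-- word[0] as a 1-char piece; exact for nonempty words (Pre_ excludes empty words, where Python raises IndexError)
def pvHd (w : List Char) : Char := w.headD ' '

def create_acronym (message : String) : String :=
  -- message = message.split('\n'); save_mes = message[:]
  let mes := PySem.Chars.splitOn message.toList ['\n']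
  let save := mes
  -- for i in range(len(message)): message[i] = message[i].split(' ')
  let mes2 := mes.map (fun l => PySem.Chars.splitOn l [' '])
  -- for i …: for j …: acronym += message[i][j][0];  acronym += ' '
  let acronym := mes2.foldl (fun acc ws => (ws.foldl (fun a w => a ++ [pvHd w]) acc) ++ [' ']) []
  -- acronym = acronym.upper(); acronym = acronym.split(' ')
  let acrs := PySem.Chars.splitOn (PySem.Chars.upper acronym) [' ']
  -- final loop: solut += acronym[i] + ' - ' + save_mes[i] (+ '\n' unless last)
  let solut := (List.range mes2.length).foldl
    (fun acc i =>
      let acc2 := (acc ++ acrs.getD i []) ++ (' ' :: '-' :: ' ' :: []) ++ save.getD i []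
      if i ≠ mes2.length - 1 then acc2 ++ ['\n'] else acc2) []
  String.ofList solut

-- ===== PORT B =====
-- acr + ' - ' + line, where acr = ''.join(word[0] for word in line.split(' ')).upper()
def pvFmtLine (l : List Char) : List Char :=
  PySem.Chars.upper ((PySem.Chars.splitOn l [' ']).map pvHd) ++ (' ' :: '-' :: ' ' :: []) ++ l

def create_acronym_alt (message : String) : String :=
  String.ofList (PySem.Chars.join ['\n']
    ((PySem.Chars.splitOn message.toList ['\n']).map pvFmtLine))

-- ===== PRECONDITION & SPEC =====
-- Pre_ excludes exactly the inputs on which A (and B) raise IndexError: some newline-split line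
-- has an empty space-split token, so word[0] raises.
def Pre_create_acronym (message : String) : Prop :=
  ∀ l ∈ PySem.Chars.splitOn message.toList ['\n'],
    ∀ w ∈ PySem.Chars.splitOn l [' '], w ≠ []
instance (message : String) : Decidable (Pre_create_acronym message) := by
  unfold Pre_create_acronym; infer_instance
def pvWitness_create_acronym : String := "random access memory\nAs soon As possible"

def Spec_create_acronym (message : String) (out : String) : Prop := out = create_acronym_alt message
instance (message : String) (out : String) : Decidable (Spec_create_acronym message out) := by unfold Spec_create_acronym; infer_instance

-- ===== CLAIM (what is proved, stated in full; the proofs are below) =====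
def Claim_equal_create_acronym : Prop := ∀ (message : String), Dom_create_acronym message → Pre_create_acronym message → Spec_create_acronym message (create_acronym message)

-- ===== LEMMAS AND PROOFS =====

-- simple structural model of s.split(c) for a one-char separator
def pvSplitC (c : Char) : List Char → List Char → List (List Char) → List (List Char)
  | [], cur, acc => (cur.reverse :: acc).reverse
  | x :: rest, cur, acc =>
      if x = c then pvSplitC c rest [] (cur.reverse :: acc)
      else pvSplitC c rest (x :: cur) acc

theorem pvGo_eq_splitC (c : Char) : ∀ (l cur : List Char) (acc : List (List Char)) (fuel : Nat),
    l.length ≤ fuel → PySem.Chars.splitOn.go [c] fuel l cur acc = pvSplitC c l cur acc := by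
  intro l
  induction l with
  | nil =>
      intro cur acc fuel _
      cases fuel <;> simp [PySem.Chars.splitOn.go.eq_def, pvSplitC]
  | cons x rest ih =>
      intro cur acc fuel hf
      cases fuel with
      | zero => simp at hf
      | succ f =>
        rw [PySem.Chars.splitOn.go.eq_def]
        dsimp only []
        by_cases hx : x = c
        · subst hx
          rw [if_pos (by simp [List.isPrefixOf])]
          simp only [List.length_cons, List.length_nil, List.drop_succ_cons, List.drop_zero]
          rw [ih _ _ f (by simp at hf; omega)]
          simp [pvSplitC]
        · rw [if_neg (by simp [List.isPrefixOf, beq_iff_eq]; exact fun h => hx h.symm)]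
          rw [ih _ _ f (by simp at hf; omega)]
          simp [pvSplitC, hx]

theorem pvSplitOn_eq_splitC (c : Char) (s : List Char) :
    PySem.Chars.splitOn s [c] = pvSplitC c s [] [] := by
  show PySem.Chars.splitOn.go [c] (s.length + 1) s [] [] = _
  exact pvGo_eq_splitC c s [] [] (s.length + 1) (by omega)

theorem pvSplitC_acc (c : Char) : ∀ (l cur : List Char) (acc : List (List Char)),
    pvSplitC c l cur acc = acc.reverse ++ pvSplitC c l cur [] := by
  intro l
  induction l with
  | nil => intro cur acc; simp [pvSplitC]
  | cons x rest ih =>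
      intro cur acc
      by_cases hx : x = c
      · simp only [pvSplitC, if_pos hx]
        rw [ih [] (cur.reverse :: acc), ih [] [cur.reverse]]
        simp
      · simp only [pvSplitC, if_neg hx]
        exact ih _ _

theorem pvSplitC_append (c : Char) : ∀ (p l cur : List Char) (acc : List (List Char)),
    c ∉ p → pvSplitC c (p ++ l) cur acc = pvSplitC c l (p.reverse ++ cur) acc := by
  intro p
  induction p with
  | nil => intro l cur acc _; simp
  | cons x rest ih =>
      intro l cur acc hp
      have hx : x ≠ c := fun h => hp (h ▸ List.mem_cons_self)
      simp only [List.cons_append, pvSplitC, if_neg hx]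
      rw [ih _ _ _ (fun h => hp (List.mem_cons_of_mem _ h))]
      simp

theorem pvSplitC_ne_nil (c : Char) : ∀ (l cur : List Char) (acc : List (List Char)),
    pvSplitC c l cur acc ≠ [] := by
  intro l
  induction l with
  | nil => intro cur acc; simp [pvSplitC]
  | cons x rest ih =>
      intro cur acc
      by_cases hx : x = c <;> simp only [pvSplitC, if_pos, hx] <;> exact ih _ _

theorem pvSplitC_no_sep (c : Char) : ∀ (l cur : List Char) (acc : List (List Char)),
    c ∉ cur → (∀ q ∈ acc, c ∉ q) → ∀ p ∈ pvSplitC c l cur acc, c ∉ p := by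
  intro l
  induction l with
  | nil =>
      intro cur acc hcur hacc p hp
      simp [pvSplitC] at hp
      rcases hp with h | h
      · exact hacc p h
      · subst h; simpa using hcur
  | cons x rest ih =>
      intro cur acc hcur hacc p hp
      by_cases hx : x = c
      · rw [pvSplitC, if_pos hx] at hp
        refine ih [] _ (by simp) ?_ p hp
        intro q hq
        rcases List.mem_cons.mp hq with h | h
        · subst h; simpa using hcur
        · exact hacc q h
      · rw [pvSplitC, if_neg hx] at hp
        refine ih _ _ ?_ hacc p hp
        intro h
        rcases List.mem_cons.mp h with h | h
        · exact hx h.symm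
        · exact hcur h

theorem pvSplitOn_no_sep (c : Char) (s : List Char) :
    ∀ p ∈ PySem.Chars.splitOn s [c], c ∉ p := by
  rw [pvSplitOn_eq_splitC]
  exact pvSplitC_no_sep c s [] [] (by simp) (by simp)

theorem pvSplitOn_ne_nil (c : Char) (s : List Char) : PySem.Chars.splitOn s [c] ≠ [] := by
  rw [pvSplitOn_eq_splitC]; exact pvSplitC_ne_nil c s [] []

-- splitting back a string built as p₁+c+p₂+c+…+pₙ+c gives [p₁,…,pₙ,'']
theorem pvSplit_join (c : Char) : ∀ (parts : List (List Char)), (∀ p ∈ parts, c ∉ p) →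
    pvSplitC c ((parts.map (· ++ [c])).flatten) [] [] = parts ++ [[]] := by
  intro parts
  induction parts with
  | nil => intro _; simp [pvSplitC]
  | cons p ps ih =>
      intro h
      have hp : c ∉ p := h p List.mem_cons_self
      simp only [List.map_cons, List.flatten_cons, List.append_assoc]
      rw [pvSplitC_append c p _ [] [] hp]
      simp only [List.singleton_append, pvSplitC]
      rw [pvSplitC_acc]
      simp [ih (fun q hq => h q (List.mem_cons_of_mem _ hq))]

-- the acronym-building double loop is a flatten
theorem pvAcr_loop (L : List (List (List Char))) : ∀ (init : List Char),
    L.foldl (fun acc ws => (ws.foldl (fun a w => a ++ [pvHd w]) acc) ++ [' ']) init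
      = init ++ (L.map (fun ws => ws.map pvHd ++ [' '])).flatten := by
  induction L with
  | nil => intro init; simp
  | cons ws L ih =>
      intro init
      simp only [List.foldl_cons, List.map_cons, List.flatten_cons]
      rw [PySem.List.foldl_append_singleton_eq_map, ih]
      simp

-- intercalate over snoc
theorem pvIntercalate_snoc {α : Type} (nl : List α) : ∀ (xs : List (List α)) (x : List α),
    List.intercalate nl (xs ++ [x]) = (xs.map (· ++ nl)).flatten ++ x := by
  intro xs
  induction xs with
  | nil => intro x; simp [List.intercalate]
  | cons a xs ih =>
      intro x
      have : List.intercalate nl (a :: (xs ++ [x])) = a ++ nl ++ List.intercalate nl (xs ++ [x]) := by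
        cases xs <;> simp [List.intercalate, List.intersperse]
      simp only [List.cons_append, this, ih, List.map_cons, List.flatten_cons]
      simp

-- the final formatting index loop is an intercalate (generic body)
theorem pvFinal_loopG (g : Nat → List Char) : ∀ (n : Nat), 0 < n →
    (List.range n).foldl
      (fun acc i =>
        let acc2 := acc ++ g i
        if i ≠ n - 1 then acc2 ++ ['\n'] else acc2) []
      = List.intercalate ['\n'] ((List.range n).map g) := by
  intro n
  induction n with
  | zero => intro h; omega
  | succ n ih =>
      intro _
      rcases Nat.eq_zero_or_pos n with hn | hn
      · subst hn
        simp [List.range_succ, List.intercalate]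
      · rw [List.range_succ, List.foldl_append, List.map_append]
        have hstep : (List.range n).foldl
            (fun acc i => let acc2 := acc ++ g i; if i ≠ n + 1 - 1 then acc2 ++ ['\n'] else acc2) []
            = (List.range n).foldl (fun acc i => acc ++ (g i ++ ['\n'])) [] := by
          apply PySem.List.foldl_congr_mem
          intro acc i hi
          have : i < n := List.mem_range.mp hi
          simp only [ne_eq]
          rw [if_pos (by omega)]
          simp
        rw [hstep, PySem.List.foldl_append_eq_flatMap]
        simp only [List.map_singleton]
        simp only [List.foldl_cons, List.foldl_nil, ne_eq, Nat.add_sub_cancel, not_true_eq_false,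
          if_false]
        rw [pvIntercalate_snoc]
        simp [List.flatMap]
        rfl

-- the loop in the shape the port writes it (after zeta-reduction of its let)
theorem pvFinal_loop (A B : Nat → List Char) (n : Nat) (hn : 0 < n) :
    (List.range n).foldl
      (fun acc i =>
        if i ≠ n - 1 then acc ++ A i ++ (' ' :: '-' :: ' ' :: []) ++ B i ++ ['\n']
        else acc ++ A i ++ (' ' :: '-' :: ' ' :: []) ++ B i) []
      = List.intercalate ['\n']
          ((List.range n).map (fun i => A i ++ [' ', '-', ' '] ++ B i)) := by
  have hfun : (fun (acc : List Char) i =>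
        if i ≠ n - 1 then acc ++ A i ++ (' ' :: '-' :: ' ' :: []) ++ B i ++ ['\n']
        else acc ++ A i ++ (' ' :: '-' :: ' ' :: []) ++ B i)
      = fun acc i =>
        let acc2 := acc ++ (A i ++ [' ', '-', ' '] ++ B i)
        if i ≠ n - 1 then acc2 ++ ['\n'] else acc2 := by
    funext acc i
    by_cases h : i ≠ n - 1 <;> simp [h, List.append_assoc]
  rw [hfun, pvFinal_loopG (fun i => A i ++ [' ', '-', ' '] ++ B i) n hn]

-- upper distributes, and produces no separator from non-separator chars
theorem pvUpperChar_ne_space (c : Char) (h : c ≠ ' ') : PySem.Chars.upperChar c ≠ ' ' := by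
  unfold PySem.Chars.upperChar PySem.Chars.islower
  split_ifs with hl
  · simp only [Bool.and_eq_true, decide_eq_true_eq] at hl
    have h1' : 97 ≤ c.toNat := hl.1
    have h2' : c.toNat ≤ 122 := hl.2
    intro hc
    have h' := congrArg Char.toNat hc
    have hv : (c.toNat - 32).isValidChar := Or.inl (by omega)
    rw [Char.toNat_ofNat, if_pos hv] at h'
    have h32 : (' ').toNat = 32 := rfl
    omega
  · exact h

-- ===== VERDICT (by name: the statement is the Claim_ definition above) =====
theorem create_acronym_spec : Claim_equal_create_acronym := by
  intro message _ hpre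
  unfold Spec_create_acronym create_acronym create_acronym_alt
  simp only []
  set lines := PySem.Chars.splitOn message.toList ['\n'] with hlines
  have hwords : ∀ l ∈ lines, ∀ w ∈ PySem.Chars.splitOn l [' '], w ≠ [] := hpre
  -- the acronym string
  rw [pvAcr_loop]
  -- each per-line acronym (uppercased) contains no space
  have hnosp : ∀ l ∈ lines, ' ' ∉ PySem.Chars.upper ((PySem.Chars.splitOn l [' ']).map pvHd) := by
    intro l hl hmem
    unfold PySem.Chars.upper at hmem
    rcases List.mem_map.mp hmem with ⟨c, hc, hcu⟩
    rcases List.mem_map.mp hc with ⟨w, hw, hwc⟩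
    have hwne : w ≠ [] := hwords l hl w hw
    have hwnosp : ' ' ∉ w := pvSplitOn_no_sep ' ' l w hw
    have hcne : c ≠ ' ' := by
      subst hwc
      cases w with
      | nil => exact absurd rfl hwne
      | cons a t =>
        intro h
        exact hwnosp (h ▸ List.mem_cons_self)
    exact pvUpperChar_ne_space c hcne hcu
  -- upper of the flattened acronym, then split
  have hupper : PySem.Chars.upper ([] ++ ((lines.map (fun l => PySem.Chars.splitOn l [' '])).map
        (fun ws => ws.map pvHd ++ [' '])).flatten)
      = (((lines.map (fun l => PySem.Chars.upper ((PySem.Chars.splitOn l [' ']).map pvHd))).map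
        (· ++ [' ']))).flatten := by
    unfold PySem.Chars.upper
    simp only [List.nil_append, List.map_flatten, List.map_map]
    congr 1
    apply List.map_congr_left
    intro l _
    simp [Function.comp, PySem.Chars.upperChar, PySem.Chars.islower]
  rw [hupper]
  rw [pvSplitOn_eq_splitC, pvSplit_join ' ' _ (by
    intro p hp
    rcases List.mem_map.mp hp with ⟨l, hl, hlp⟩
    exact hlp ▸ hnosp l hl)]
  -- the final loop
  have hn : 0 < lines.length := List.length_pos_iff.mpr (pvSplitOn_ne_nil '\n' message.toList)
  rw [List.length_map]
  have hloop := pvFinal_loop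
    (fun i => (lines.map (fun l => PySem.Chars.upper ((PySem.Chars.splitOn l [' ']).map pvHd)) ++ [[]]).getD i [])
    (fun i => lines.getD i []) lines.length hn
  simp only [] at hloop
  rw [hloop]
  congr 1
  unfold PySem.Chars.join
  congr 1
  apply List.ext_getElem (by simp)
  intro i h1 h2
  simp only [List.getElem_map, List.getElem_range]
  have hi : i < lines.length := by simpa using h1
  unfold pvFmtLine
  have hg1 : (lines.map (fun l => PySem.Chars.upper ((PySem.Chars.splitOn l [' ']).map pvHd)) ++ [[]]).getD i []
      = PySem.Chars.upper ((PySem.Chars.splitOn lines[i] [' ']).map pvHd) := by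
    rw [List.getD_eq_getElem?_getD, List.getElem?_append_left (by simpa using hi)]
    simp [hi]
  have hg2 : lines.getD i [] = lines[i] := by
    rw [List.getD_eq_getElem?_getD, List.getElem?_eq_getElem hi]; rfl
  rw [hg1, hg2]
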